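-- pv_equiv track=rewrite | github.com/SiddharthGianchandani/Face-Recognizer | real or fake image trainer.py | consider1
-- ===== SOURCE A (Python) =====
-- def consider1(loc,loc1,bottom_limit,right_limit):
--    for m1 in loc1:
--       temp=[]
--       for m in loc:
--          if (m[0]-30<=m1[0]<=m[0]+30)or(m[1]-30<=m1[1]<=m[1]+30)or(m[2]-30<=m1[2]<=m[2]+30)or(m[3]-30<=m1[3]<=m[3]+30):
--            continue
--          temp.append(m)
--       loc=temp
--
--    for m in loc:
--       loc1.append(m)
--    l=[]
--    for (top,right,bottom,left) in loc1:
--       if bottom<=bottom_limit and right<=right_limit: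
--          l.append((top,right,bottom,left))
--
--    return l
-- ===== SOURCE B (Python) =====
-- # B: per-coordinate sorted arrays + binary search replace the per-box rescan of loc1.
-- # Return-value equivalence only: A mutates loc1 in place (appends surviving boxes), B does not.
-- def _bisect_left(s, a):
--     lo, hi = 0, len(s)
--     while lo < hi:
--         mid = (lo + hi) // 2
--         if s[mid] < a:
--             lo = mid + 1
--         else:
--             hi = mid
--     return lo
--
-- def _near(s, v):
--     i = _bisect_left(s, v - 30)
--     return i < len(s) and s[i] <= v + 30
--
-- def consider1(loc, loc1, bottom_limit, right_limit):
--     tops = sorted(m1[0] for m1 in loc1)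
--     rights = sorted(m1[1] for m1 in loc1)
--     bottoms = sorted(m1[2] for m1 in loc1)
--     lefts = sorted(m1[3] for m1 in loc1)
--     kept = [m for m in loc
--             if not (_near(tops, m[0]) or _near(rights, m[1])
--                     or _near(bottoms, m[2]) or _near(lefts, m[3]))]
--     return [(top, right, bottom, left) for (top, right, bottom, left) in loc1 + kept
--             if bottom <= bottom_limit and right <= right_limit]
-- ===== Notes on version B (the rewrite author's own statement) =====
-- stated objective: alternative
-- what changed: Instead of rebuilding loc once per element of loc1 (a pass over loc for every m1), B sorts the four coordinate columns of loc1 once and tests each box of loc for a +-30 neighbour with one binary search per coordinate.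
import Mathlib
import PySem

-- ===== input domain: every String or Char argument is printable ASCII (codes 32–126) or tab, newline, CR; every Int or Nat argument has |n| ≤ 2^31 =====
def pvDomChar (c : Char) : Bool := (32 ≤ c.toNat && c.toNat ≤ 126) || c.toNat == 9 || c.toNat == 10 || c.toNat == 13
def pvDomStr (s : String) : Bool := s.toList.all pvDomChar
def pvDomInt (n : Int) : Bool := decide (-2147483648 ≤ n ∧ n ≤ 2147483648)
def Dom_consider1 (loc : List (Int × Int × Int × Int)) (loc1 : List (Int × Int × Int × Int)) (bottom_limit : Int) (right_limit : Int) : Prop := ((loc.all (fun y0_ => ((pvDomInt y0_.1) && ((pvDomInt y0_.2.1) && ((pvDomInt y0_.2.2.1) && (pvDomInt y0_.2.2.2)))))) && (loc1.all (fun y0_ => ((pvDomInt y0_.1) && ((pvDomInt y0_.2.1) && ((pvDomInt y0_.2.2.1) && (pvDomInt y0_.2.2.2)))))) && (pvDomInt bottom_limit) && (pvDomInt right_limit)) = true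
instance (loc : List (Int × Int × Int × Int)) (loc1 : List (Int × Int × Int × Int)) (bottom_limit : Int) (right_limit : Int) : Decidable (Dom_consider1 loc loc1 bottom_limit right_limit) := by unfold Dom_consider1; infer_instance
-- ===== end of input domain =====

-- B replaces A's per-m1 rescans of loc by four sorted columns + binary search (return value only: A appends to loc1 in place, B does not).


-- ===== PORT A =====
def consider1 (loc : List (Int × Int × Int × Int)) (loc1 : List (Int × Int × Int × Int)) (bottom_limit : Int) (right_limit : Int) : List (Int × Int × Int × Int) :=
  let loc' := loc1.foldl (fun lc m1 =>
    lc.foldl (fun temp m =>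
      if (m.1 - 30 ≤ m1.1 ∧ m1.1 ≤ m.1 + 30) ∨ (m.2.1 - 30 ≤ m1.2.1 ∧ m1.2.1 ≤ m.2.1 + 30) ∨
         (m.2.2.1 - 30 ≤ m1.2.2.1 ∧ m1.2.2.1 ≤ m.2.2.1 + 30) ∨ (m.2.2.2 - 30 ≤ m1.2.2.2 ∧ m1.2.2.2 ≤ m.2.2.2 + 30)
      then temp else temp ++ [m]) []) loc
  let loc1' := loc'.foldl (fun l1 m => l1 ++ [m]) loc1
  loc1'.foldl (fun l t => if t.2.2.1 ≤ bottom_limit ∧ t.2.1 ≤ right_limit then l ++ [t] else l) []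

-- ===== PORT B =====
-- Source B's hand-written _bisect_left is CPython's bisect_left lo/hi halving loop, ported as
-- PySem.List.bisectLeft (the identical loop).
def altNear (s : List Int) (v : Int) : Bool :=
  match s[PySem.List.bisectLeft s (v - 30)]? with
  | some y => decide (y ≤ v + 30)
  | none => false

def consider1_alt (loc : List (Int × Int × Int × Int)) (loc1 : List (Int × Int × Int × Int)) (bottom_limit : Int) (right_limit : Int) : List (Int × Int × Int × Int) :=
  let tops := PySem.List.sorted (loc1.map (·.1)) (fun x => x) false
  let rights := PySem.List.sorted (loc1.map (·.2.1)) (fun x => x) false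
  let bottoms := PySem.List.sorted (loc1.map (·.2.2.1)) (fun x => x) false
  let lefts := PySem.List.sorted (loc1.map (·.2.2.2)) (fun x => x) false
  let kept := loc.filter (fun m =>
    !(altNear tops m.1 || altNear rights m.2.1 || altNear bottoms m.2.2.1 || altNear lefts m.2.2.2))
  (loc1 ++ kept).filter (fun t => decide (t.2.2.1 ≤ bottom_limit) && decide (t.2.1 ≤ right_limit))

-- ===== PRECONDITION & SPEC =====
def Spec_consider1 (loc : List (Int × Int × Int × Int)) (loc1 : List (Int × Int × Int × Int)) (bottom_limit : Int) (right_limit : Int) (out : List (Int × Int × Int × Int)) : Prop := out = consider1_alt loc loc1 bottom_limit right_limit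
instance (loc : List (Int × Int × Int × Int)) (loc1 : List (Int × Int × Int × Int)) (bottom_limit : Int) (right_limit : Int) (out : List (Int × Int × Int × Int)) : Decidable (Spec_consider1 loc loc1 bottom_limit right_limit out) := by unfold Spec_consider1; infer_instance

-- ===== CLAIM (what is proved, stated in full; the proofs are below) =====
def Claim_equal_consider1 : Prop := ∀ (loc : List (Int × Int × Int × Int)) (loc1 : List (Int × Int × Int × Int)) (bottom_limit : Int) (right_limit : Int), Dom_consider1 loc loc1 bottom_limit right_limit → Spec_consider1 loc loc1 bottom_limit right_limit (consider1 loc loc1 bottom_limit right_limit)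

-- ===== LEMMAS AND PROOFS =====
-- binary-search characterisation: altNear on a sorted list tests for an element in [v-30, v+30]
theorem altNear_eq_true_iff (s : List Int) (v : Int) (hp : s.Pairwise (· ≤ ·)) :
    altNear s v = true ↔ ∃ y ∈ s, v - 30 ≤ y ∧ y ≤ v + 30 := by
  obtain ⟨hle, hlt, hge⟩ := PySem.List.bisectLeft_spec s (v - 30) hp
  unfold altNear
  rcases Nat.lt_or_ge (PySem.List.bisectLeft s (v - 30)) s.length with hilt | hige
  · rw [List.getElem?_eq_getElem hilt]
    simp only [decide_eq_true_eq]
    constructor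
    · intro h
      exact ⟨s[PySem.List.bisectLeft s (v - 30)], List.getElem_mem hilt,
        hge _ hilt le_rfl, h⟩
    · rintro ⟨y, hy, h1, h2⟩
      obtain ⟨j, hj, rfl⟩ := List.getElem_of_mem hy
      have hij : PySem.List.bisectLeft s (v - 30) ≤ j := by
        by_contra hc
        exact absurd h1 (not_le.mpr (hlt j hj (Nat.lt_of_not_le hc)))
      have : s[PySem.List.bisectLeft s (v - 30)] ≤ s[j] := by
        rcases Nat.lt_or_eq_of_le hij with h | h
        · exact (List.pairwise_iff_getElem.mp hp) _ _ hilt hj h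
        · simp [h]
      exact le_trans this h2
  · rw [List.getElem?_eq_none hige]
    simp only [Bool.false_eq_true, false_iff]
    rintro ⟨y, hy, h1, _⟩
    obtain ⟨j, hj, rfl⟩ := List.getElem_of_mem hy
    exact absurd h1 (not_le.mpr (hlt j hj (Nat.lt_of_lt_of_le hj hige)))

theorem altNear_sorted_iff (xs : List Int) (v : Int) :
    altNear (PySem.List.sorted xs (fun x => x) false) v = true ↔
      ∃ y ∈ xs, v - 30 ≤ y ∧ y ≤ v + 30 := by
  rw [altNear_eq_true_iff _ _ (PySem.List.sorted_pairwise xs (fun x => x))]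
  simp [PySem.List.mem_sorted]

theorem bool_not_or4 (a b c d : Bool) :
    ((!(a || b || c || d)) = true) ↔
      (¬ (a = true) ∧ ¬ (b = true) ∧ ¬ (c = true) ∧ ¬ (d = true)) := by
  cases a <;> cases b <;> cases c <;> cases d <;> simp

-- A's repeated filtering of loc over loc1 is one filter by the conjunction of all tests
theorem foldl_filter_all {α β : Type} (p : α → β → Bool) (l1 : List β) :
    ∀ loc : List α, l1.foldl (fun lc m1 => lc.filter (fun m => p m m1)) loc
      = loc.filter (fun m => l1.all (fun m1 => p m m1)) := by
  induction l1 with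
  | nil => intro loc; simp
  | cons a t ih =>
      intro loc
      rw [List.foldl_cons, ih, List.filter_filter]
      exact List.filter_congr (fun m _ => by simp [Bool.and_comm])


-- ===== VERDICT (by name: the statement is the Claim_ definition above) =====
theorem consider1_spec : Claim_equal_consider1 := by
  intro loc loc1 bottom_limit right_limit _
  unfold Spec_consider1 consider1 consider1_alt
  -- A's inner rebuild loop is a filter
  have hinner : ∀ (lc : List (Int × Int × Int × Int)) (m1 : Int × Int × Int × Int),
      lc.foldl (fun temp m =>
        if (m.1 - 30 ≤ m1.1 ∧ m1.1 ≤ m.1 + 30) ∨ (m.2.1 - 30 ≤ m1.2.1 ∧ m1.2.1 ≤ m.2.1 + 30) ∨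
           (m.2.2.1 - 30 ≤ m1.2.2.1 ∧ m1.2.2.1 ≤ m.2.2.1 + 30) ∨ (m.2.2.2 - 30 ≤ m1.2.2.2 ∧ m1.2.2.2 ≤ m.2.2.2 + 30)
        then temp else temp ++ [m]) []
      = lc.filter (fun m => decide (¬ ((m.1 - 30 ≤ m1.1 ∧ m1.1 ≤ m.1 + 30) ∨ (m.2.1 - 30 ≤ m1.2.1 ∧ m1.2.1 ≤ m.2.1 + 30) ∨
           (m.2.2.1 - 30 ≤ m1.2.2.1 ∧ m1.2.2.1 ≤ m.2.2.1 + 30) ∨ (m.2.2.2 - 30 ≤ m1.2.2.2 ∧ m1.2.2.2 ≤ m.2.2.2 + 30)))) := by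
    intro lc m1
    have hfun : (fun (temp : List (Int × Int × Int × Int)) m =>
        if (m.1 - 30 ≤ m1.1 ∧ m1.1 ≤ m.1 + 30) ∨ (m.2.1 - 30 ≤ m1.2.1 ∧ m1.2.1 ≤ m.2.1 + 30) ∨
           (m.2.2.1 - 30 ≤ m1.2.2.1 ∧ m1.2.2.1 ≤ m.2.2.1 + 30) ∨ (m.2.2.2 - 30 ≤ m1.2.2.2 ∧ m1.2.2.2 ≤ m.2.2.2 + 30)
        then temp else temp ++ [m])
      = (fun temp m =>
        if ¬ ((m.1 - 30 ≤ m1.1 ∧ m1.1 ≤ m.1 + 30) ∨ (m.2.1 - 30 ≤ m1.2.1 ∧ m1.2.1 ≤ m.2.1 + 30) ∨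
           (m.2.2.1 - 30 ≤ m1.2.2.1 ∧ m1.2.2.1 ≤ m.2.2.1 + 30) ∨ (m.2.2.2 - 30 ≤ m1.2.2.2 ∧ m1.2.2.2 ≤ m.2.2.2 + 30))
        then temp ++ [m] else temp) := by
      funext temp m; rw [ite_not]
    rw [hfun, PySem.List.foldl_append_ite_eq_filter, List.nil_append]
  simp only [hinner]
  rw [foldl_filter_all, PySem.List.foldl_append_singleton_eq_self,
      PySem.List.foldl_append_ite_eq_filter]
  rw [List.nil_append]
  have houter : ∀ t : Int × Int × Int × Int,
      (decide (t.2.2.1 ≤ bottom_limit ∧ t.2.1 ≤ right_limit))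
        = (decide (t.2.2.1 ≤ bottom_limit) && decide (t.2.1 ≤ right_limit)) := fun t => by simp
  simp only [houter]
  refine congrArg _ (congrArg (loc1 ++ ·) (List.filter_congr ?_))
  intro m _
  apply Bool.coe_iff_coe.mp
  rw [bool_not_or4, altNear_sorted_iff, altNear_sorted_iff, altNear_sorted_iff,
      altNear_sorted_iff]
  simp only [List.all_eq_true, decide_eq_true_eq, List.mem_map, not_exists, not_or]
  constructor
  · intro h
    refine ⟨?_, ?_, ?_, ?_⟩
    · rintro y ⟨⟨m1, hm1, rfl⟩, hy1, hy2⟩; exact (h m1 hm1).1 ⟨hy1, hy2⟩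
    · rintro y ⟨⟨m1, hm1, rfl⟩, hy1, hy2⟩; exact (h m1 hm1).2.1 ⟨hy1, hy2⟩
    · rintro y ⟨⟨m1, hm1, rfl⟩, hy1, hy2⟩; exact (h m1 hm1).2.2.1 ⟨hy1, hy2⟩
    · rintro y ⟨⟨m1, hm1, rfl⟩, hy1, hy2⟩; exact (h m1 hm1).2.2.2 ⟨hy1, hy2⟩
  · rintro ⟨h1, h2, h3, h4⟩ m1 hm1
    exact ⟨fun hc => h1 _ ⟨⟨m1, hm1, rfl⟩, hc.1, hc.2⟩,
           fun hc => h2 _ ⟨⟨m1, hm1, rfl⟩, hc.1, hc.2⟩,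
           fun hc => h3 _ ⟨⟨m1, hm1, rfl⟩, hc.1, hc.2⟩,
           fun hc => h4 _ ⟨⟨m1, hm1, rfl⟩, hc.1, hc.2⟩⟩
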